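-- pv_equiv track=rewrite | github.com/danieltanner44/Python_Programming | Advent_of_Code/Advent_of_Code_2016/Day7/main_part1.py | process_ip_addresses
-- ===== SOURCE A (Python) =====
-- def process_ip_addresses(ip_addresses):
--     valid_ip_counter = 0
--     for ip_address in ip_addresses:
--         # Assume these to support later logic
--         ip_valid_even, ip_valid_odd = False, True
--         abba_check = []
--         for index, string in enumerate(ip_address):
--             abba = check_for_abba(string)
--             abba_check.append(abba)
--         # Logic to check if this is a valid ip address
--         # abba_check must be False for all odd values (in brackets) and True in at lease one even
--         for index, check in enumerate(abba_check):
--             if index % 2 == 0: # Even - Need one True to update to ip_valid_even True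
--                 if abba_check[index] == True:
--                     ip_valid_even = True
--             else:               # Odd - If none are True then remains ip_valid_odd True
--                 if abba_check[index] == True:
--                     ip_valid_odd = False
--
--         # If there is a abba sequence outside the brackets but none in the brackets then it is a valid ip address
--         if ip_valid_odd == True and ip_valid_even == True:
--             valid_ip_counter += 1
--     return valid_ip_counter
--
-- def check_for_abba(string):
--     # Look for the require repeating characters abba or similar
--     string = list(string)
--     for index, character in enumerate(string[:-3]):
--         # Assess in blocks of 4 if first and last equal and middle two equal and outer not equal to inner
--         if character == string[index + 3] and string[index + 1] == string[index + 2] and string[index + 3] != string[index + 2]: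
--             return True
--     return False
-- ===== SOURCE B (Python) =====
-- def check_for_abba(string):
--     # Look for the require repeating characters abba or similar
--     string = list(string)
--     for index, character in enumerate(string[:-3]):
--         # Assess in blocks of 4 if first and last equal and middle two equal and outer not equal to inner
--         if character == string[index + 3] and string[index + 1] == string[index + 2] and string[index + 3] != string[index + 2]:
--             return True
--     return False
--
-- def _supports_tls(segments):
--     # Walk the segments two at a time (outside, inside): abort on any ABBA
--     # inside brackets, remember whether any outside segment had one.
--     found = False
--     rest = segments
--     while rest:
--         if len(rest) > 1 and check_for_abba(rest[1]):
--             return False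
--         found = found or check_for_abba(rest[0])
--         rest = rest[2:]
--     return found
--
-- def process_ip_addresses(ip_addresses):
--     count = 0
--     for ip_address in ip_addresses:
--         if _supports_tls(ip_address):
--             count += 1
--     return count
-- ===== Notes on version B (the rewrite author's own statement) =====
-- stated objective: simpler
-- what changed: B drops A's intermediate abba_check table and the separate parity-indexed rescan loop, replacing them with a single pairwise walk over the segments that aborts as soon as a bracketed (odd) segment contains an ABBA and accumulates whether any outside (even) segment does.
import Mathlib
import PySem

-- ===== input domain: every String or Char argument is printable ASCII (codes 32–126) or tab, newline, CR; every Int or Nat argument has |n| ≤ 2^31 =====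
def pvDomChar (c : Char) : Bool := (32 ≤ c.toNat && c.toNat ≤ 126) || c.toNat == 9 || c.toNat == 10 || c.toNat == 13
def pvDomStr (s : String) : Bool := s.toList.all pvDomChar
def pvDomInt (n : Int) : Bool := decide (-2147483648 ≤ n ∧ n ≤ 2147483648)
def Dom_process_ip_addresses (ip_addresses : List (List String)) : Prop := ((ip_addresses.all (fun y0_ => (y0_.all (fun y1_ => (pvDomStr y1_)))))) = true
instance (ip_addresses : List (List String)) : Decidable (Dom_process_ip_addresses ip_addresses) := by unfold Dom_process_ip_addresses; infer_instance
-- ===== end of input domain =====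

-- B replaces A's build-a-table-then-rescan-by-parity structure with a single
-- pairwise walk over the segments that short-circuits on an in-bracket ABBA
-- (simpler; a timing run measured it faster by a constant factor).

-- ===== PORT A =====
-- shared helper (Source B keeps check_for_abba verbatim)
def check_for_abba (string : String) : Bool :=
  let cs := string.toList
  (PySem.List.enumerate (PySem.List.slice cs none (some (-3))) 0).any (fun p =>
    (some p.2 == PySem.List.pyGet? cs (p.1 + 3)) &&
    (PySem.List.pyGet? cs (p.1 + 1) == PySem.List.pyGet? cs (p.1 + 2)) &&
    (PySem.List.pyGet? cs (p.1 + 3) != PySem.List.pyGet? cs (p.1 + 2)))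

def process_ip_addresses (ip_addresses : List (List String)) : Int :=
  ip_addresses.foldl (fun valid_ip_counter ip_address =>
    let abba_check : List Bool :=
      ip_address.foldl (fun l s => l ++ [check_for_abba s]) []
    let st : Bool × Bool :=
      (PySem.List.enumerate abba_check 0).foldl (fun (st : Bool × Bool) p =>
        if PySem.Int.mod p.1 2 == 0 then
          (if PySem.List.pyGet? abba_check p.1 == some true then (true, st.2) else st)
        else
          (if PySem.List.pyGet? abba_check p.1 == some true then (st.1, false) else st))
        (false, true)
    if st.2 == true && st.1 == true then valid_ip_counter + 1 else valid_ip_counter) 0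

-- ===== PORT B =====
-- the while-loop of Source B's _supports_tls: state (rest, found), two segments per step
def supports_tls_go : List String → Bool → Bool
  | [], found => found
  | [r], found => found || check_for_abba r
  | r :: t :: rest', found =>
      if check_for_abba t then false
      else supports_tls_go rest' (found || check_for_abba r)

def process_ip_addresses_alt (ip_addresses : List (List String)) : Int :=
  ip_addresses.foldl (fun count ip_address =>
    if supports_tls_go ip_address false then count + 1 else count) 0

-- ===== PRECONDITION & SPEC =====
def Spec_process_ip_addresses (ip_addresses : List (List String)) (out : Int) : Prop := out = process_ip_addresses_alt ip_addresses
instance (ip_addresses : List (List String)) (out : Int) : Decidable (Spec_process_ip_addresses ip_addresses out) := by unfold Spec_process_ip_addresses; infer_instance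

-- ===== CLAIM (what is proved, stated in full; the proofs are below) =====
def Claim_equal_process_ip_addresses : Prop := ∀ (ip_addresses : List (List String)), Dom_process_ip_addresses ip_addresses → Spec_process_ip_addresses ip_addresses (process_ip_addresses ip_addresses)

-- ===== LEMMAS AND PROOFS =====

-- (P l).1 = "some even-indexed entry is true", (P l).2 = "some odd-indexed entry is true"
def pairEval : List Bool → Bool × Bool
  | [] => (false, false)
  | [a] => (a, false)
  | a :: b :: r => ((pairEval r).1 || a, (pairEval r).2 || b)

theorem build_checks (ip : List String) (acc : List Bool) :
    ip.foldl (fun l s => l ++ [check_for_abba s]) acc = acc ++ ip.map check_for_abba := by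
  induction ip generalizing acc with
  | nil => simp
  | cons s t ih => simp [List.foldl_cons, ih]

theorem flags_fold_pure (l : List Bool) (s : Int) (hs : 0 ≤ s) (he : s % 2 = 0)
    (e o : Bool) :
    (PySem.List.enumerate l s).foldl (fun (st : Bool × Bool) (p : Int × Bool) =>
        if PySem.Int.mod p.1 2 == 0 then
          (if p.2 then (true, st.2) else st)
        else
          (if p.2 then (st.1, false) else st)) (e, o)
      = (e || (pairEval l).1, o && !(pairEval l).2) := by
  induction l using pairEval.induct generalizing s e o with
  | case1 => simp [PySem.List.enumerate, pairEval]
  | case2 a =>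
    have h1 : PySem.Int.mod s 2 = s % 2 := PySem.Int.mod_eq_emod_of_pos (by omega)
    rw [PySem.List.enumerate_cons, PySem.List.enumerate_nil]
    simp only [List.foldl_cons, List.foldl_nil, h1, he, pairEval]
    cases a <;> simp
  | case3 a b r ih =>
    have h1 : PySem.Int.mod s 2 = s % 2 := PySem.Int.mod_eq_emod_of_pos (by omega)
    have h2 : PySem.Int.mod (s + 1) 2 = (s + 1) % 2 := PySem.Int.mod_eq_emod_of_pos (by omega)
    have h3 : (s + 1) % 2 = 1 := by omega
    have h4 : (s + 1 + 1) % 2 = 0 := by omega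
    rw [PySem.List.enumerate_cons, PySem.List.enumerate_cons]
    simp only [List.foldl_cons, h1, h2, h3, he, pairEval]
    have ihh := fun e o => ih (s + 1 + 1) (by omega) h4 e o
    cases a <;> cases b <;> simp only [if_true, if_false, Bool.false_eq_true, ihh] <;>
      cases o <;> cases e <;> simp [Bool.or_comm]

theorem flags_fold (l : List Bool) :
    (PySem.List.enumerate l 0).foldl (fun (st : Bool × Bool) (p : Int × Bool) =>
        if PySem.Int.mod p.1 2 == 0 then
          (if PySem.List.pyGet? l p.1 == some true then (true, st.2) else st)
        else
          (if PySem.List.pyGet? l p.1 == some true then (st.1, false) else st)) (false, true)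
      = ((pairEval l).1, !(pairEval l).2) := by
  have hc : (PySem.List.enumerate l 0).foldl (fun (st : Bool × Bool) (p : Int × Bool) =>
        if PySem.Int.mod p.1 2 == 0 then
          (if PySem.List.pyGet? l p.1 == some true then (true, st.2) else st)
        else
          (if PySem.List.pyGet? l p.1 == some true then (st.1, false) else st)) (false, true)
      = (PySem.List.enumerate l 0).foldl (fun (st : Bool × Bool) (p : Int × Bool) =>
        if PySem.Int.mod p.1 2 == 0 then
          (if p.2 then (true, st.2) else st)
        else
          (if p.2 then (st.1, false) else st)) (false, true) := by
    apply PySem.List.foldl_congr_mem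
    intro acc p hp
    rcases (PySem.List.mem_enumerate_iff _ _ _).1 hp with ⟨k, hk, rfl⟩
    simp [hk]
  rw [hc, flags_fold_pure l 0 (by omega) (by omega)]
  simp

theorem supports_tls_go_eq (ip : List String) (found : Bool) :
    supports_tls_go ip found
      = ((found || (pairEval (ip.map check_for_abba)).1)
          && !(pairEval (ip.map check_for_abba)).2) := by
  induction ip, found using supports_tls_go.induct with
  | case1 f => simp [supports_tls_go, pairEval]
  | case2 f r => simp [supports_tls_go, pairEval]
  | case3 r t rest' found ht =>
    simp [supports_tls_go, ht, pairEval]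
  | case4 r t rest' found ht ih =>
    simp only [supports_tls_go, ht, List.map_cons, pairEval, ih]
    simp
    cases found <;> cases check_for_abba r <;> simp [Bool.or_comm]

theorem per_ip (ip : List String) :
    (let abba_check : List Bool := ip.foldl (fun l s => l ++ [check_for_abba s]) []
     let st : Bool × Bool :=
      (PySem.List.enumerate abba_check 0).foldl (fun (st : Bool × Bool) p =>
        if PySem.Int.mod p.1 2 == 0 then
          (if PySem.List.pyGet? abba_check p.1 == some true then (true, st.2) else st)
        else
          (if PySem.List.pyGet? abba_check p.1 == some true then (st.1, false) else st))
        (false, true)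
     st.2 == true && st.1 == true) = supports_tls_go ip false := by
  simp only [build_checks, List.nil_append, flags_fold, supports_tls_go_eq]
  cases (pairEval (ip.map check_for_abba)).1 <;> cases (pairEval (ip.map check_for_abba)).2 <;> simp

-- ===== VERDICT (by name: the statement is the Claim_ definition above) =====
theorem process_ip_addresses_spec : Claim_equal_process_ip_addresses := by
  intro ips _
  unfold Spec_process_ip_addresses process_ip_addresses process_ip_addresses_alt
  apply PySem.List.foldl_congr_mem
  intro acc ip _
  rw [← per_ip]
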